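-- pv_equiv track=rewrite | github.com/DuncanSparks/Keysmash | Prompts/sort_words.py | word_weight
-- ===== SOURCE A (Python) =====
-- punctuation = ",.?!#$%&()-+=/'\":;"
--
-- numbers = "1234567890"
--
-- def word_weight(word: str) -> int:
-- 	score = 0
-- 	for char in word:
-- 		score += 1
-- 		if char in numbers:
-- 			score += 1
-- 		if char in punctuation:
-- 			score += 2
--
-- 	return score
-- ===== SOURCE B (Python) =====
-- punctuation = ",.?!#$%&()-+=/'\":;"
--
-- numbers = "1234567890"
--
-- def word_weight(word: str) -> int:
--     # Iterate over the fixed alphabets, not over the word: each digit in the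
--     # word contributes 1 extra, each punctuation char 2 extra, on top of len.
--     score = len(word)
--     for d in numbers:
--         score += word.count(d)
--     for p in punctuation:
--         score += 2 * word.count(p)
--     return score
-- ===== Notes on version B (the rewrite author's own statement) =====
-- stated objective: faster
-- what changed: B loops over the fixed digit and punctuation alphabets adding word.count of each character (base score len(word)), instead of A's single per-character scan of the word with a branching accumulator; the per-character Python-level work is replaced by C-level str.count calls.
import Mathlib
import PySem

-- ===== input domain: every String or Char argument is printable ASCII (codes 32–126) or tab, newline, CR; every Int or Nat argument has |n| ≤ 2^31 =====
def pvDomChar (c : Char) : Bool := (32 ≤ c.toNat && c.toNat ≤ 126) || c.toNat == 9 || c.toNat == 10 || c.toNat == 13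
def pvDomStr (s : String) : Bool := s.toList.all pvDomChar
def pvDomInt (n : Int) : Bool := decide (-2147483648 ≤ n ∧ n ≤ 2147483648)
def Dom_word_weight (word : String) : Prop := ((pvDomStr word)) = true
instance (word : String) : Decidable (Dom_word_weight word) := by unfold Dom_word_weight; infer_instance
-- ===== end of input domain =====

-- B iterates over the fixed digit/punctuation alphabets summing per-character counts of the word, instead of A's single branching scan of the word (objective: faster in a timing run — C-level str.count replaces the Python per-character loop).

def pvPunct : List Char := ",.?!#$%&()-+=/'\":;".toList
def pvNums : List Char := "1234567890".toList

-- ===== PORT A =====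
def word_weight (word : String) : Int :=
  word.toList.foldl (fun score char =>
    let s1 := score + 1
    let s2 := if pvNums.contains char then s1 + 1 else s1
    if pvPunct.contains char then s2 + 2 else s2) 0

-- ===== PORT B =====
-- word.count(d) for a single-character pattern d is exactly List.count on the
-- character list (no overlapping-substring subtlety for length-1 patterns).
def word_weight_alt (word : String) : Int :=
  let score0 : Int := (word.toList.length : Int)
  let score1 := pvNums.foldl (fun s d => s + (word.toList.count d : Int)) score0
  pvPunct.foldl (fun s p => s + 2 * (word.toList.count p : Int)) score1

-- ===== PRECONDITION & SPEC =====
def Spec_word_weight (word : String) (out : Int) : Prop := out = word_weight_alt word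
instance (word : String) (out : Int) : Decidable (Spec_word_weight word out) := by unfold Spec_word_weight; infer_instance

-- ===== CLAIM =====
def Claim_equal_word_weight : Prop := ∀ (word : String), Dom_word_weight word → Spec_word_weight word (word_weight word)

-- ===== LEMMAS AND PROOFS =====
-- A's single scan equals length + digit-filter length + 2 * punctuation-filter length.
theorem pv_foldl_weight (l : List Char) (a : Int) :
    l.foldl (fun score char =>
      let s1 := score + 1
      let s2 := if pvNums.contains char then s1 + 1 else s1
      if pvPunct.contains char then s2 + 2 else s2) a
    = a + (l.length : Int)
      + ((l.filter (fun c => pvNums.contains c)).length : Int)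
      + 2 * ((l.filter (fun c => pvPunct.contains c)).length : Int) := by
  induction l generalizing a with
  | nil => simp
  | cons c t ih =>
    simp only [List.foldl_cons, List.filter_cons, ih]
    split_ifs <;> simp <;> ring

-- Splitting a membership filter at a fresh head character.
theorem pv_filter_or_len (c : Char) (t : List Char) (hc : c ∉ t) (l : List Char) :
    (l.filter (fun x => x == c || t.contains x)).length
      = l.count c + (l.filter (fun x => t.contains x)).length := by
  induction l with
  | nil => simp
  | cons y l ih =>
    by_cases hy : y = c <;> by_cases ht : y ∈ t
    all_goals first
      | exact absurd (hy ▸ ht : c ∈ t) hc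
      | (simp [List.filter_cons, List.count_cons, hy, ht, hc] at ih ⊢; omega)

-- Summing k * count over a duplicate-free alphabet equals k * membership-filter length.
theorem pv_foldl_count (k : Int) (l : List Char) :
    ∀ (chars : List Char), chars.Nodup → ∀ (a : Int),
    chars.foldl (fun s d => s + k * (l.count d : Int)) a
      = a + k * ((l.filter (fun c => chars.contains c)).length : Int) := by
  intro chars
  induction chars with
  | nil => intro _ a; simp
  | cons c t ih =>
    intro hnd a
    have hc : c ∉ t := by simp [List.nodup_cons] at hnd; exact hnd.1
    have hnt : t.Nodup := by simp [List.nodup_cons] at hnd; exact hnd.2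
    simp only [List.foldl_cons, ih hnt]
    have := pv_filter_or_len c t hc l
    simp only [List.contains_cons] at *
    rw [this]
    push_cast
    ring

-- ===== VERDICT =====
theorem word_weight_spec : Claim_equal_word_weight := by
  intro word _
  unfold Spec_word_weight word_weight word_weight_alt
  rw [pv_foldl_weight]
  have h1 : (fun (s : Int) (d : Char) => s + (word.toList.count d : Int))
      = (fun s d => s + 1 * (word.toList.count d : Int)) := by
    funext s d; ring
  rw [h1]
  simp only [pv_foldl_count 1 word.toList pvNums (by decide),
    pv_foldl_count 2 word.toList pvPunct (by decide)]
  ring
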